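-- pv_equiv track=rewrite | github.com/LingDong-/Hermit | src/lib/parse.py | parse
-- ===== SOURCE A (Python) =====
-- def parse(command,allcommands):
-- 	allcommands.sort()
-- 	results = []
-- 	if command == "":
-- 		return results
-- 	command = command.strip()
-- 	for c in allcommands:
-- 		if "".join([x[0] for x in c.split(" ")])==command:
-- 			if not c in results:
-- 				results.append(c)
-- 	for c in allcommands:
-- 		if c.startswith(command):
-- 			if not c in results:
-- 				results.append(c)
--
-- 	for c in allcommands:
-- 		if (not False in [c.split(" ")[min(i,len(c.split(" "))-1)].startswith(command.split(" ")[i]) for i in range (len(command.split(" ")))]):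
-- 			if not c in results:
-- 				results.append(c)
-- 	for c in allcommands:
-- 		if "".join(c.split(" ")).startswith(command):
-- 			if not c in results:
-- 				results.append(c)
-- 	for c in allcommands:
-- 		if "".join([x[0] for x in c.split(" ")]).startswith(command):
-- 			if not c in results:
-- 				results.append(c)
-- 	for c in allcommands:
-- 		for d in c.split(" "):
-- 			if d.startswith(command):
-- 				if not c in results:
-- 					results.append(c)
-- 	for c in allcommands:
-- 		if command in "".join(c.split(" ")[i][0] for i in range(0,len(c.split(" ")))):
-- 			if not c in results:
-- 				results.append(c)
--
-- 	return results
-- ===== SOURCE B (Python) =====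
-- def parse(command, allcommands):
--     # Same in-place sort side effect as the original.
--     allcommands.sort()
--     if command == "":
--         return []
--     command = command.strip()
--     cwords = command.split(" ")
--     # One pass: classify each command by the first (highest-priority) rule it
--     # satisfies, collecting it into that rule's bucket.
--     buckets = [[] for _ in range(7)]
--     for c in allcommands:
--         words = c.split(" ")
--         inits = "".join(w[0] for w in words)
--         if inits == command:
--             r = 0
--         elif c.startswith(command):
--             r = 1
--         elif all(words[min(i, len(words) - 1)].startswith(cwords[i])
--                  for i in range(len(cwords))):
--             r = 2
--         elif "".join(words).startswith(command):
--             r = 3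
--         elif inits.startswith(command):
--             r = 4
--         elif any(w.startswith(command) for w in words):
--             r = 5
--         elif command in inits:
--             r = 6
--         else:
--             continue
--         buckets[r].append(c)
--     results = []
--     for b in buckets:
--         for c in b:
--             if c not in results:
--                 results.append(c)
--     return results
-- ===== Notes on version B (the rewrite author's own statement) =====
-- stated objective: faster
-- what changed: A makes seven separate scans over the sorted command list (one per priority rule, re-splitting every command in each scan, with dedup against the growing result list); B makes ONE scan that splits/joins each command once and assigns it to the bucket of the first rule it satisfies, then concatenates the seven buckets with the same first-occurrence dedup.
import Mathlib
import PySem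

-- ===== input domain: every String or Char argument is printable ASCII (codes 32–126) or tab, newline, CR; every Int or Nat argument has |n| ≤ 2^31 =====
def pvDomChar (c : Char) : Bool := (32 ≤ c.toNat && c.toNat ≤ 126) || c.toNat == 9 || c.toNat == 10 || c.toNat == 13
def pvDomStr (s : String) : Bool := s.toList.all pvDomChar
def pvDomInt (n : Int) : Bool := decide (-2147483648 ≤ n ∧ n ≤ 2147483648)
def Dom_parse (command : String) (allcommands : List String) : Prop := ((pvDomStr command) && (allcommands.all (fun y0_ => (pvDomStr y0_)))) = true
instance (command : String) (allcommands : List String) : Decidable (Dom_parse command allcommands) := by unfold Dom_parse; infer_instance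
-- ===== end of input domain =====

-- B replaces A's seven scans over the command list by ONE scan that classifies each
-- command by the first matching rule into seven buckets, then concatenates the buckets
-- with the same first-occurrence dedup.  Both A and B sort `allcommands` IN PLACE
-- (the Python argument mutation is identical); the equivalence proved is on the return value.

-- shared helper: c.split(" ")  (sep is the non-empty literal " ", so split? is some)
def pvSplitSp (s : String) : List String := (PySem.Str.split? s " ").getD []
-- shared helper: x[0] as a 1-char string; "" only where Python raises IndexError (excluded by Pre_)
def pvInit (x : String) : String := ((PySem.Str.pyGet? x 0).map (fun ch => String.ofList [ch])).getD ""
-- "".join([x[0] for x in c.split(" ")])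
def pvInits (c : String) : String := PySem.Str.join "" ((pvSplitSp c).map pvInit)

-- the seven priority predicates, written once and used by both ports
def pvP0 (cmd c : String) : Bool := pvInits c == cmd
def pvP1 (cmd c : String) : Bool := PySem.Str.startswith c cmd
-- A's pass 3: not False in [words[min(i,len(words)-1)].startswith(cwords[i]) for i in range(len(cwords))]
def pvP2A (cmd c : String) : Bool :=
  !(((List.range (pvSplitSp cmd).length).map (fun i =>
      PySem.Str.startswith ((pvSplitSp c).getD (min i ((pvSplitSp c).length - 1)) "")
        ((pvSplitSp cmd).getD i ""))).contains false)
-- B's same test written with all(...)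
def pvP2B (cmd c : String) : Bool :=
  (List.range (pvSplitSp cmd).length).all (fun i =>
      PySem.Str.startswith ((pvSplitSp c).getD (min i ((pvSplitSp c).length - 1)) "")
        ((pvSplitSp cmd).getD i ""))
def pvP3 (cmd c : String) : Bool := PySem.Str.startswith (PySem.Str.join "" (pvSplitSp c)) cmd
def pvP4 (cmd c : String) : Bool := PySem.Str.startswith (pvInits c) cmd
def pvP5 (cmd c : String) : Bool := (pvSplitSp c).any (fun d => PySem.Str.startswith d cmd)
-- A's pass 7 initials: "".join(c.split(" ")[i][0] for i in range(0,len(c.split(" "))))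
def pvInitsIdx (c : String) : String :=
  PySem.Str.join "" ((List.range (pvSplitSp c).length).map (fun i => pvInit ((pvSplitSp c).getD i "")))
def pvP6A (cmd c : String) : Bool := PySem.Str.isIn cmd (pvInitsIdx c)
def pvP6B (cmd c : String) : Bool := PySem.Str.isIn cmd (pvInits c)

-- ===== PORT A =====
def parse (command : String) (allcommands : List String) : List String :=
  let srt := PySem.List.sorted allcommands id false
  if command == "" then []
  else
    let cmd := PySem.Str.strip command
    let r := srt.foldl (fun res c => if pvP0 cmd c then (if c ∈ res then res else res ++ [c]) else res) []
    let r := srt.foldl (fun res c => if pvP1 cmd c then (if c ∈ res then res else res ++ [c]) else res) r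
    let r := srt.foldl (fun res c => if pvP2A cmd c then (if c ∈ res then res else res ++ [c]) else res) r
    let r := srt.foldl (fun res c => if pvP3 cmd c then (if c ∈ res then res else res ++ [c]) else res) r
    let r := srt.foldl (fun res c => if pvP4 cmd c then (if c ∈ res then res else res ++ [c]) else res) r
    -- pass 6: nested loop over the words of c
    let r := srt.foldl (fun res c =>
      (pvSplitSp c).foldl (fun res d =>
        if PySem.Str.startswith d cmd then (if c ∈ res then res else res ++ [c]) else res) res) r
    let r := srt.foldl (fun res c => if pvP6A cmd c then (if c ∈ res then res else res ++ [c]) else res) r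
    r

-- ===== PORT B =====
structure PvBk where
  b0 : List String
  b1 : List String
  b2 : List String
  b3 : List String
  b4 : List String
  b5 : List String
  b6 : List String
deriving Repr, DecidableEq

-- B's single classification pass: first matching rule wins, else the command is dropped
def pvClassify (cmd : String) (srt : List String) : PvBk :=
  srt.foldl (fun b c =>
    if pvP0 cmd c then { b with b0 := b.b0 ++ [c] }
    else if pvP1 cmd c then { b with b1 := b.b1 ++ [c] }
    else if pvP2B cmd c then { b with b2 := b.b2 ++ [c] }
    else if pvP3 cmd c then { b with b3 := b.b3 ++ [c] }
    else if pvP4 cmd c then { b with b4 := b.b4 ++ [c] }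
    else if pvP5 cmd c then { b with b5 := b.b5 ++ [c] }
    else if pvP6B cmd c then { b with b6 := b.b6 ++ [c] }
    else b) ⟨[], [], [], [], [], [], []⟩

def parse_alt (command : String) (allcommands : List String) : List String :=
  let srt := PySem.List.sorted allcommands id false
  if command == "" then []
  else
    let cmd := PySem.Str.strip command
    let bk := pvClassify cmd srt
    [bk.b0, bk.b1, bk.b2, bk.b3, bk.b4, bk.b5, bk.b6].foldl
      (fun res b => b.foldl (fun res c => if c ∈ res then res else res ++ [c]) res) []

-- ===== PRECONDITION & SPEC =====
-- Pre_ excludes exactly the inputs on which the Python A raises IndexError: a non-empty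
-- command together with some listed command that has an empty space-separated token
-- (empty string, leading/trailing/double space), where x[0] fails in pass 1.
def Pre_parse (command : String) (allcommands : List String) : Prop :=
  command = "" ∨ ∀ c ∈ allcommands, ¬ ("" ∈ (PySem.Str.split? c " ").getD [])
instance (command : String) (allcommands : List String) : Decidable (Pre_parse command allcommands) := by unfold Pre_parse; infer_instance
def pvWitness_parse : String × List String := ("gc", ["git commit", "open", "git push"])
def Spec_parse (command : String) (allcommands : List String) (out : List String) : Prop := out = parse_alt command allcommands
instance (command : String) (allcommands : List String) (out : List String) : Decidable (Spec_parse command allcommands out) := by unfold Spec_parse; infer_instance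

-- ===== CLAIM (what is proved, stated in full; the proofs are below) =====
def Claim_equal_parse : Prop := ∀ (command : String) (allcommands : List String), Dom_parse command allcommands → Pre_parse command allcommands → Spec_parse command allcommands (parse command allcommands)

-- ===== LEMMAS AND PROOFS =====

-- first-occurrence dedup-append of a whole list onto an accumulator
def pvDApp (acc l : List String) : List String :=
  l.foldl (fun res c => if c ∈ res then res else res ++ [c]) acc

-- A's shape: fold the pass predicates left to right
def pvChainA (L : List String) (ps : List (String → Bool)) (acc : List String) : List String :=
  ps.foldl (fun a p => pvDApp a (L.filter p)) acc

-- B's shape: same passes, but each pass filtered to the commands no earlier pass matched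
def pvChainB (L : List String) (ps : List (String → Bool)) (g : String → Bool) (acc : List String) : List String :=
  match ps with
  | [] => acc
  | p :: ps => pvChainB L ps (fun c => g c && !p c) (pvDApp acc (L.filter (fun c => g c && p c)))

theorem pvDApp_mem_of_mem_acc (l acc : List String) (c : String) (h : c ∈ acc) : c ∈ pvDApp acc l := by
  induction l generalizing acc with
  | nil => exact h
  | cons d l ih =>
    simp only [pvDApp, List.foldl_cons]
    apply ih
    split
    · exact h
    · exact List.mem_append_left _ h

theorem pvDApp_mem_of_mem (l acc : List String) (c : String) (h : c ∈ l) : c ∈ pvDApp acc l := by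
  induction l generalizing acc with
  | nil => cases h
  | cons d l ih =>
    simp only [pvDApp, List.foldl_cons]
    rcases List.mem_cons.1 h with h | h
    · subst h
      apply pvDApp_mem_of_mem_acc
      split
      · assumption
      · simp
    · exact ih _ h

-- dropping already-present elements does not change a dedup-append
theorem pvDApp_filter (l acc : List String) (g : String → Bool)
    (h : ∀ c ∈ l, g c = false → c ∈ acc) : pvDApp acc l = pvDApp acc (l.filter g) := by
  induction l generalizing acc with
  | nil => rfl
  | cons c l ih =>
    rcases hg : g c with _ | _
    · have hc : c ∈ acc := h c (List.mem_cons_self) hg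
      simp only [pvDApp, List.foldl_cons, List.filter_cons, hg, if_pos hc, Bool.false_eq_true,
        if_neg (by simp : ¬ (False : Prop))]
      exact ih acc (fun d hd hgd => h d (List.mem_cons_of_mem _ hd) hgd)
    · simp only [pvDApp, List.filter_cons, hg, if_pos trivial, List.foldl_cons]
      apply ih
      intro d hd hgd
      have := h d (List.mem_cons_of_mem _ hd) hgd
      split
      · exact this
      · exact List.mem_append_left _ this

-- the crux: the seven plain passes equal the seven disjoint (first-match) passes
theorem pvChain_eq (L : List String) (ps : List (String → Bool)) (acc : List String)
    (g : String → Bool) (hacc : ∀ c ∈ L, g c = false → c ∈ acc) :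
    pvChainA L ps acc = pvChainB L ps g acc := by
  induction ps generalizing g acc with
  | nil => rfl
  | cons p ps ih =>
    have h1 : pvDApp acc (L.filter p) = pvDApp acc (L.filter (fun c => g c && p c)) := by
      rw [pvDApp_filter (L.filter p) acc g
        (fun c hc hgc => hacc c (List.mem_of_mem_filter hc) hgc)]
      congr 1
      rw [List.filter_filter]
    simp only [pvChainA, pvChainB, List.foldl_cons]
    rw [show pvDApp acc (L.filter p) = pvDApp acc (L.filter (fun c => g c && p c)) from h1]
    apply ih
    intro c hc hgc
    rcases Bool.and_eq_false_iff.1 hgc with hgc | hpc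
    · exact pvDApp_mem_of_mem_acc _ _ _ (hacc c hc hgc)
    · rcases hg : g c with _ | _
      · exact pvDApp_mem_of_mem_acc _ _ _ (hacc c hc hg)
      · refine pvDApp_mem_of_mem _ _ _ ?_
        refine List.mem_filter.2 ⟨hc, ?_⟩
        simp [hg, Bool.not_eq_true' .. ▸ hpc]
        simpa using hpc

-- each genuine pass of A is a dedup-append of the filtered list
theorem pvPass_eq (L acc : List String) (p : String → Bool) :
    L.foldl (fun res c => if p c then (if c ∈ res then res else res ++ [c]) else res) acc
      = pvDApp acc (L.filter p) := by
  rw [pvDApp, List.foldl_filter]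

-- A's pass 6 (nested loop over words) is the pass for predicate pvP5
theorem pvInner_id (cmd : String) (ds res : List String) (c : String) (h : c ∈ res) :
    ds.foldl (fun res d => if PySem.Str.startswith d cmd then (if c ∈ res then res else res ++ [c]) else res) res = res := by
  induction ds with
  | nil => rfl
  | cons d ds ih => simp only [List.foldl_cons, if_pos h, ite_self]; exact ih

theorem pvInner_eq (cmd : String) (c : String) (ds res : List String) :
    ds.foldl (fun res d => if PySem.Str.startswith d cmd then (if c ∈ res then res else res ++ [c]) else res) res
      = if ds.any (fun d => PySem.Str.startswith d cmd) then (if c ∈ res then res else res ++ [c]) else res := by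
  induction ds generalizing res with
  | nil => rfl
  | cons d ds ih =>
    rcases hd : PySem.Str.startswith d cmd with _ | _
    · simp only [List.foldl_cons, hd, Bool.false_eq_true, if_neg (by simp : ¬ (False : Prop)),
        List.any_cons, Bool.false_or]
      exact ih res
    · simp only [List.foldl_cons, hd, if_pos trivial, List.any_cons, Bool.true_or, if_pos trivial]
      split
      · exact pvInner_id cmd ds res c ‹c ∈ res›
      · exact pvInner_id cmd ds _ c (by simp)

theorem pvPass6_eq (cmd : String) (L acc : List String) :
    L.foldl (fun res c =>
      (pvSplitSp c).foldl (fun res d =>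
        if PySem.Str.startswith d cmd then (if c ∈ res then res else res ++ [c]) else res) res) acc
      = pvDApp acc (L.filter (pvP5 cmd)) := by
  have hfun : (fun (res : List String) (c : String) =>
      (pvSplitSp c).foldl (fun res d =>
        if PySem.Str.startswith d cmd then (if c ∈ res then res else res ++ [c]) else res) res)
      = (fun (res : List String) (c : String) =>
          if pvP5 cmd c then (if c ∈ res then res else res ++ [c]) else res) := by
    funext res c
    rw [pvInner_eq]
    rfl
  rw [hfun, pvPass_eq]

-- the two spellings of the range-indexed tests agree
theorem pvP2_eq (cmd c : String) : pvP2A cmd c = pvP2B cmd c := by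
  simp only [pvP2A, pvP2B]
  generalize List.range (pvSplitSp cmd).length = l
  induction l with
  | nil => rfl
  | cons i l ih =>
    simp only [List.map_cons, List.all_cons, ← ih]
    cases PySem.Str.startswith ((pvSplitSp c).getD (min i ((pvSplitSp c).length - 1)) "") ((pvSplitSp cmd).getD i "") <;> simp

theorem pvInitsIdx_eq (c : String) : pvInitsIdx c = pvInits c := by
  simp only [pvInitsIdx, pvInits]
  congr 1
  apply List.ext_getElem (by simp)
  intro i h1 h2
  simp only [List.getElem_map, List.getElem_range]
  rw [List.getD_eq_getElem _ _ (by simpa using h2)]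

theorem pvP6_eq (cmd c : String) : pvP6A cmd c = pvP6B cmd c := by
  simp [pvP6A, pvP6B, pvInitsIdx_eq]

-- B's classification pass produces exactly the first-match filters
theorem pvClassify_spec (cmd : String) (L : List String) (b : PvBk) :
    L.foldl (fun b c =>
      if pvP0 cmd c then { b with b0 := b.b0 ++ [c] }
      else if pvP1 cmd c then { b with b1 := b.b1 ++ [c] }
      else if pvP2B cmd c then { b with b2 := b.b2 ++ [c] }
      else if pvP3 cmd c then { b with b3 := b.b3 ++ [c] }
      else if pvP4 cmd c then { b with b4 := b.b4 ++ [c] }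
      else if pvP5 cmd c then { b with b5 := b.b5 ++ [c] }
      else if pvP6B cmd c then { b with b6 := b.b6 ++ [c] }
      else b) b
    = ⟨b.b0 ++ L.filter (fun c => pvP0 cmd c),
       b.b1 ++ L.filter (fun c => !pvP0 cmd c && pvP1 cmd c),
       b.b2 ++ L.filter (fun c => (!pvP0 cmd c && !pvP1 cmd c) && pvP2B cmd c),
       b.b3 ++ L.filter (fun c => ((!pvP0 cmd c && !pvP1 cmd c) && !pvP2B cmd c) && pvP3 cmd c),
       b.b4 ++ L.filter (fun c => (((!pvP0 cmd c && !pvP1 cmd c) && !pvP2B cmd c) && !pvP3 cmd c) && pvP4 cmd c),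
       b.b5 ++ L.filter (fun c => ((((!pvP0 cmd c && !pvP1 cmd c) && !pvP2B cmd c) && !pvP3 cmd c) && !pvP4 cmd c) && pvP5 cmd c),
       b.b6 ++ L.filter (fun c => (((((!pvP0 cmd c && !pvP1 cmd c) && !pvP2B cmd c) && !pvP3 cmd c) && !pvP4 cmd c) && !pvP5 cmd c) && pvP6B cmd c)⟩ := by
  induction L generalizing b with
  | nil => simp
  | cons c L ih =>
    simp only [List.foldl_cons, List.filter_cons]
    by_cases h0 : pvP0 cmd c <;> by_cases h1 : pvP1 cmd c <;> by_cases h2 : pvP2B cmd c <;>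
      by_cases h3 : pvP3 cmd c <;> by_cases h4 : pvP4 cmd c <;> by_cases h5 : pvP5 cmd c <;>
      by_cases h6 : pvP6B cmd c <;>
      simp only [h0, h1, h2, h3, h4, h5, h6, Bool.not_true, Bool.not_false, Bool.true_and,
        Bool.false_and, Bool.and_true, Bool.and_false, if_true, if_false, ite_true, ite_false,
        Bool.false_eq_true, ite_self] <;>
      rw [ih] <;> simp [List.append_assoc]

theorem parse_eq_chainA (command : String) (allcommands : List String) (h : ¬ command == "") :
    parse command allcommands
      = pvChainA (PySem.List.sorted allcommands id false)
          [pvP0 (PySem.Str.strip command), pvP1 (PySem.Str.strip command),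
           pvP2B (PySem.Str.strip command), pvP3 (PySem.Str.strip command),
           pvP4 (PySem.Str.strip command), pvP5 (PySem.Str.strip command),
           pvP6B (PySem.Str.strip command)] [] := by
  have h2 : pvP2A (PySem.Str.strip command) = pvP2B (PySem.Str.strip command) :=
    funext (pvP2_eq (PySem.Str.strip command))
  have h6 : pvP6A (PySem.Str.strip command) = pvP6B (PySem.Str.strip command) :=
    funext (pvP6_eq (PySem.Str.strip command))
  simp only [parse, if_neg h, pvChainA, List.foldl_cons, List.foldl_nil]
  rw [pvPass_eq, pvPass_eq, pvPass_eq, pvPass_eq, pvPass_eq, pvPass6_eq, pvPass_eq, h2, h6]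

theorem parse_alt_eq_chainB (command : String) (allcommands : List String) (h : ¬ command == "") :
    parse_alt command allcommands
      = pvChainB (PySem.List.sorted allcommands id false)
          [pvP0 (PySem.Str.strip command), pvP1 (PySem.Str.strip command),
           pvP2B (PySem.Str.strip command), pvP3 (PySem.Str.strip command),
           pvP4 (PySem.Str.strip command), pvP5 (PySem.Str.strip command),
           pvP6B (PySem.Str.strip command)] (fun _ => true) [] := by
  simp only [parse_alt, if_neg h, pvClassify]
  rw [pvClassify_spec]
  simp only [pvChainB, pvDApp, List.foldl_cons, List.foldl_nil, List.nil_append, Bool.true_and,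
    Bool.and_assoc]

-- ===== VERDICT (by name: the statement is the Claim_ definition above) =====
theorem parse_spec : Claim_equal_parse := by
  intro command allcommands _ _
  unfold Spec_parse
  by_cases h : command == ""
  · simp only [parse, parse_alt, if_pos h]
  · rw [parse_eq_chainA command allcommands h, parse_alt_eq_chainB command allcommands h]
    exact pvChain_eq _ _ _ _ (by simp)
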